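-- pv_equiv track=rewrite | github.com/gwon11225/boj | 백준/Silver/1802. 종이 접기/종이 접기.py | paper
-- ===== SOURCE A (Python) =====
-- def paper(w):
--     if len(w) == 1:
--         return True
--     mid = len(w)//2
--     for i in range(mid):
--         if w[i] == w[-i - 1]:
--             return False
--     return paper(w[:mid])
-- ===== SOURCE B (Python) =====
-- def paper(w):
--     # Stage 1: precompute the halving chain of segment lengths.
--     lengths = []
--     m = len(w)
--     while m != 1:
--         lengths.append(m)
--         m //= 2
--     # Stage 2: one flat pass — valid iff no symmetric pair within any chain segment matches.
--     return not any(w[i] == w[m - 1 - i] for m in lengths for i in range(m // 2))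
-- ===== Notes on version B (the rewrite author's own statement) =====
-- stated objective: alternative
-- what changed: Replaces A's linear recursion on string slices by two staged passes: first a loop that materialises the halving chain of segment lengths, then a single flat any() over all (segment, index) pairs in the original string; no slicing or recursion.
import Mathlib
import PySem

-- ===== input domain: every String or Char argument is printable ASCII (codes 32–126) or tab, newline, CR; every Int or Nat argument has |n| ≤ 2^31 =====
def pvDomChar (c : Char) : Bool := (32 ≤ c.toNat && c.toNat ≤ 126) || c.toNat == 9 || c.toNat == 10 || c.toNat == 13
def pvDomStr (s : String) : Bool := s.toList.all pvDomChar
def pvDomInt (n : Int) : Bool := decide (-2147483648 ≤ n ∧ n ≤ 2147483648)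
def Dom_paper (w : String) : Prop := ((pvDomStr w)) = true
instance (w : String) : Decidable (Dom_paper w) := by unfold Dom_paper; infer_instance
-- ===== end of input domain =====

-- B replaces A's recursion on string slices by two staged passes (chain of lengths, then one flat any); objective: alternative decomposition, no slicing or recursion on the string.

-- ===== PORT A =====
-- A's recursion halves the segment each step; the fuel (initial length) only makes
-- the definition total — it is never exhausted on the inputs Pre_paper admits.
def paperGo (fuel : Nat) (l : List Char) : Bool :=
  match fuel with
  | 0 => true
  | fuel + 1 =>
    if l.length = 1 then true
    else
      let mid := l.length / 2
      if (List.range mid).any (fun i =>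
           PySem.List.pyGet? l (i : Int) == PySem.List.pyGet? l (-(i : Int) - 1))
      then false
      else paperGo fuel (PySem.List.slice l none (some (mid : Int)))

def paper (w : String) : Bool := paperGo w.toList.length w.toList

-- ===== PORT B =====
-- B stage 1: the while-loop collecting the halving chain of lengths (fuel = initial length,
-- only for totality; never exhausted when the start length is nonzero).
def chainLengths (fuel m : Nat) : List Nat :=
  match fuel with
  | 0 => []
  | fuel + 1 => if m = 1 then [] else m :: chainLengths fuel (m / 2)

-- B stage 2: the flat generator `any(w[i] == w[m-1-i] for m in lengths for i in range(m//2))`.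
def paper_alt (w : String) : Bool :=
  let l := w.toList
  let lengths := chainLengths l.length l.length
  !(lengths.any (fun m => (List.range (m / 2)).any (fun i =>
      PySem.List.pyGet? l (i : Int) == PySem.List.pyGet? l ((m : Int) - 1 - (i : Int)))))

-- ===== PRECONDITION & SPEC =====
-- Pre_ excludes only the empty string, on which Python A raises RecursionError (and B's first loop never terminates).
def Pre_paper (w : String) : Prop := w.toList ≠ []
instance (w : String) : Decidable (Pre_paper w) := by unfold Pre_paper; infer_instance
def pvWitness_paper : String := "ab"

def Spec_paper (w : String) (out : Bool) : Prop := out = paper_alt w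
instance (w : String) (out : Bool) : Decidable (Spec_paper w out) := by unfold Spec_paper; infer_instance

-- ===== CLAIM (what is proved, stated in full; the proofs are below) =====
def Claim_equal_paper : Prop := ∀ (w : String), Dom_paper w → Pre_paper w → Spec_paper w (paper w)

-- ===== LEMMAS AND PROOFS =====

-- A's pair test on the prefix l.take n equals B's pair test on l at segment length n.
lemma pair_test_eq (l : List Char) (n i : Nat) (hn : n ≤ l.length) (hi : i + 1 ≤ n) :
    (PySem.List.pyGet? (l.take n) (i : Int) == PySem.List.pyGet? (l.take n) (-(i : Int) - 1))
      = (PySem.List.pyGet? l (i : Int) == PySem.List.pyGet? l ((n : Int) - 1 - (i : Int))) := by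
  have hlen : (l.take n).length = n := by simp [Nat.min_eq_left hn]
  have h1 : PySem.List.pyGet? (l.take n) (i : Int) = l[i]? := by
    rw [PySem.List.pyGet?_natCast, List.getElem?_take_of_lt (by omega)]
  have hneg : (-(i : Int) - 1) = -(((i + 1 : Nat)) : Int) := by push_cast; ring
  have h2 : PySem.List.pyGet? (l.take n) (-(i : Int) - 1) = l[n - (i + 1)]? := by
    rw [hneg, PySem.List.pyGet?_neg_natCast (l.take n) (i + 1) (by omega) (by rw [hlen]; omega),
        hlen, List.getElem?_take_of_lt (by omega)]
  have h3 : PySem.List.pyGet? l ((n : Int) - 1 - (i : Int)) = l[n - (i + 1)]? := by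
    have h4 : ((n : Int) - 1 - (i : Int)) = ((n - (i + 1) : Nat) : Int) := by omega
    rw [h4, PySem.List.pyGet?_natCast]
  rw [h1, h2, h3, PySem.List.pyGet?_natCast]

-- Main invariant: A on the prefix l.take n equals the negated flat any over the chain from n.
lemma go_eq (fuel : Nat) : ∀ (l : List Char) (n : Nat), n ≤ l.length →
    paperGo fuel (l.take n)
      = !((chainLengths fuel n).any (fun m => (List.range (m / 2)).any (fun i =>
          PySem.List.pyGet? l (i : Int) == PySem.List.pyGet? l ((m : Int) - 1 - (i : Int))))) := by
  induction fuel with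
  | zero => intro l n _; simp [paperGo, chainLengths]
  | succ fuel ih =>
    intro l n hn
    have hlen : (l.take n).length = n := by simp [Nat.min_eq_left hn]
    have hany : ((List.range (n / 2)).any (fun i =>
          PySem.List.pyGet? (l.take n) (i : Int) == PySem.List.pyGet? (l.take n) (-(i : Int) - 1)))
        = ((List.range (n / 2)).any (fun i =>
          PySem.List.pyGet? l (i : Int) == PySem.List.pyGet? l ((n : Int) - 1 - (i : Int)))) := by
      have eAny : ∀ (g : Nat → Bool),
          (List.range (n / 2)).any g = ((List.range (n / 2)).map g).any id := by
        intro g; simp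
      rw [eAny, eAny]
      congr 1
      exact List.map_congr_left (fun i hi => by
        rw [List.mem_range] at hi
        exact pair_test_eq l n i hn (by omega))
    simp only [paperGo, chainLengths, hlen]
    by_cases h1 : n = 1
    · simp [h1]
    · rw [if_neg h1, if_neg h1, List.any_cons, hany]
      cases hb : (List.range (n / 2)).any (fun i =>
          PySem.List.pyGet? l (i : Int) == PySem.List.pyGet? l ((n : Int) - 1 - (i : Int))) with
      | true => simp
      | false =>
        rw [if_neg (by simp), Bool.false_or]
        rw [PySem.List.slice_to_natCast, List.take_take,
            Nat.min_eq_left (Nat.div_le_self n 2)]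
        exact ih l (n / 2) (le_trans (Nat.div_le_self n 2) hn)

-- ===== VERDICT (by name: the statement is the Claim_ definition above) =====
theorem paper_spec : Claim_equal_paper := by
  intro w _ _
  unfold Spec_paper paper paper_alt
  exact ((congrArg (paperGo w.toList.length) (List.take_length (l := w.toList)).symm).trans
    (go_eq w.toList.length w.toList w.toList.length (le_refl _)))
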